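-- pv_equiv track=rewrite | github.com/andrei-migunov/four-stage-gpac-to-2pp | St0_Fns.py | plpp_to_ode
-- ===== SOURCE A (Python) =====
-- def plpp_to_ode(sys):
--     # Assume input is in the form [[k,[input vector],[output vector]]
--
--     # Initialize the output for the ode with all the variables we'll need to be able to determine the function for
--     ode_keys = []
--     for i in range(len(sys[0][1])):
--         ode_keys.append("z"+str(i))
--
--     # Create a dict using all the variables so we can store the ODE functions per variable
--     ode_output = dict.fromkeys(ode_keys)
--
--     # For each reactant in the input, we're going to build out its function
--     for i in range(len(sys[0][1])):
--         append_str = ""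
--         # For each function in the PLPP, we're going to search for occurances of the current reactant
--         for plpp_reac in sys:
--             # If the reactant is in the input and not the output, add the input to the function times the frequency of its occurence
--             if plpp_reac[2][i] != 0 and plpp_reac[1][i] == 0:
--                 append_str += " + ( " + str(plpp_reac[0])
--                 for j in range(len(plpp_reac[1])):
--                     if plpp_reac[1][j] != 0:
--                         append_str += " * " + "z" + str(j)
--                 append_str += " )"
--             # If the reactant is in the input and not the output, subtract the input from the function times the frequency of its occurence
--             if plpp_reac[1][i] != 0 and plpp_reac[2][i] == 0:
--                 append_str += " - ( " + str(plpp_reac[0])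
--                 for j in range(len(plpp_reac[1])):
--                     if plpp_reac[1][j] != 0:
--                         append_str += " * " + "z" + str(j)
--                 append_str += " )"
--         # If every function in which the reactant occured, the reactant was both in the input and output (i.e. it always cancelled itself out), assign 0 as its function as nothing impacts it
--         if append_str == "":
--             append_str = "0"
--
--         # If the first symbol in the function associated with the reactant is a plus sign, drop the plus sign as its redundant
--         if len(append_str) > 1:
--             if append_str[1] == "+":
--                 append_str = append_str[2:]
--
--         # Write the formula to the dict of functions
--         ode_output[ode_keys[i]] = append_str
--
--     return ode_output
-- ===== SOURCE B (Python) =====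
-- def plpp_to_ode(sys):
--     # One pass over the reactions: each reaction's monomial string is built once,
--     # then appended (with sign) to the accumulator of every reactant it affects.
--     n = len(sys[0][1])
--     acc = [""] * n
--     for k, inp, out in sys:
--         mono = str(k) + "".join(" * z" + str(j) for j in range(len(inp)) if inp[j] != 0)
--         acc = [s + " + ( " + mono + " )" if out[i] != 0 and inp[i] == 0
--                else s + " - ( " + mono + " )" if inp[i] != 0 and out[i] == 0
--                else s
--                for i, s in enumerate(acc)]
--     result = {}
--     for i, s in enumerate(acc):
--         if s == "":
--             s = "0"
--         if len(s) > 1 and s[1] == "+":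
--             s = s[2:]
--         result["z" + str(i)] = s
--     return result
-- ===== Notes on version B (the rewrite author's own statement) =====
-- stated objective: alternative
-- what changed: B interchanges the loops: one pass over reactions, computing each reaction's monomial string exactly once and pushing it (with sign) into per-reactant accumulators, instead of A's per-reactant rescan of all reactions that rebuilds the monomial at every hit.
import Mathlib
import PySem

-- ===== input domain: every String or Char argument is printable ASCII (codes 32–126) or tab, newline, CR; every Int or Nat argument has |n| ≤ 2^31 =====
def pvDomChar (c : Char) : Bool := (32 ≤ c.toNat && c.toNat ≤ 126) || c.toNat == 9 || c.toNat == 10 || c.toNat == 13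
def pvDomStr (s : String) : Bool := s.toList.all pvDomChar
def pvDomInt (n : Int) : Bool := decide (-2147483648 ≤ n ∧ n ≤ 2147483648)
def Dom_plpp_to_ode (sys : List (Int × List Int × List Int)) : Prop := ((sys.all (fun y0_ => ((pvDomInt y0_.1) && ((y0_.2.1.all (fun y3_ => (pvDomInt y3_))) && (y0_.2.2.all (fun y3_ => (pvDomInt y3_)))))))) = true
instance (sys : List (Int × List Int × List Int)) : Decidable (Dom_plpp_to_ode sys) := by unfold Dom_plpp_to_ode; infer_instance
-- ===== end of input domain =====

-- B interchanges A's loops: one pass over the reactions, each reaction's monomial built once and pushed into per-reactant accumulators (alternative decomposition, same cost).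


-- Shared tail code of both Pythons ('' -> '0'; drop a leading " +"); string work is done on List Char (PySem.Chars).
def pvFinish (cs : List Char) : String :=
  let cs := if cs = [] then ['0'] else cs
  let cs := if 1 < cs.length ∧ PySem.List.pyGet? cs 1 = some '+' then PySem.List.slice cs (some 2) none else cs
  String.ofList cs

-- ===== PORT A =====
-- A's dict has the distinct keys "z0".."z(n-1)" assigned once each, in order, so its items list is this map over range n.
-- '[] => []' stands for the IndexError Python raises on sys[0] (excluded by Pre_); pyGetD's default 0 is likewise only reached outside Pre_.
def plpp_to_ode (sys : List (Int × List Int × List Int)) : List (String × String) :=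
  match sys with
  | [] => []
  | first :: _ =>
    let n := first.2.1.length
    (List.range n).map (fun (i : Nat) =>
      let s := sys.foldl (fun acc reac =>
        let acc :=
          if PySem.List.pyGetD reac.2.2 (i : Int) 0 ≠ 0 ∧ PySem.List.pyGetD reac.2.1 (i : Int) 0 = 0 then
            ((List.range reac.2.1.length).foldl
              (fun a (j : Nat) => if PySem.List.pyGetD reac.2.1 (j : Int) 0 ≠ 0 then a ++ " * z".toList ++ PySem.Int.toChars (j : Int) else a)
              (acc ++ " + ( ".toList ++ PySem.Int.toChars reac.1)) ++ " )".toList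
          else acc
        if PySem.List.pyGetD reac.2.1 (i : Int) 0 ≠ 0 ∧ PySem.List.pyGetD reac.2.2 (i : Int) 0 = 0 then
          ((List.range reac.2.1.length).foldl
            (fun a (j : Nat) => if PySem.List.pyGetD reac.2.1 (j : Int) 0 ≠ 0 then a ++ " * z".toList ++ PySem.Int.toChars (j : Int) else a)
            (acc ++ " - ( ".toList ++ PySem.Int.toChars reac.1)) ++ " )".toList
        else acc) []
      (String.ofList ('z' :: PySem.Int.toChars (i : Int)), pvFinish s))

-- ===== PORT B =====
def plpp_to_ode_alt (sys : List (Int × List Int × List Int)) : List (String × String) :=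
  match sys with
  | [] => []
  | first :: _ =>
    let n := first.2.1.length
    let acc := sys.foldl (fun acc reac =>
      let mono := PySem.Int.toChars reac.1 ++
        PySem.Chars.join []
          (((List.range reac.2.1.length).filter (fun (j : Nat) => PySem.List.pyGetD reac.2.1 (j : Int) 0 != 0)).map
            (fun (j : Nat) => " * z".toList ++ PySem.Int.toChars (j : Int))) ;
      acc.mapIdx (fun i s =>
        if PySem.List.pyGetD reac.2.2 (i : Int) 0 ≠ 0 ∧ PySem.List.pyGetD reac.2.1 (i : Int) 0 = 0 then
          s ++ " + ( ".toList ++ mono ++ " )".toList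
        else if PySem.List.pyGetD reac.2.1 (i : Int) 0 ≠ 0 ∧ PySem.List.pyGetD reac.2.2 (i : Int) 0 = 0 then
          s ++ " - ( ".toList ++ mono ++ " )".toList
        else s)) (List.replicate n ([] : List Char))
    acc.mapIdx (fun i s => (String.ofList ('z' :: PySem.Int.toChars (i : Int)), pvFinish s))

-- ===== PRECONDITION & SPEC =====
-- Pre_ excludes exactly the inputs where Python A raises IndexError: the empty system (sys[0]) and
-- systems where some reaction's input or output vector is shorter than the first reaction's input vector.
def Pre_plpp_to_ode (sys : List (Int × List Int × List Int)) : Prop :=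
  sys ≠ [] ∧ ∀ r ∈ sys, sys.headI.2.1.length ≤ r.2.1.length ∧ sys.headI.2.1.length ≤ r.2.2.length
instance (sys : List (Int × List Int × List Int)) : Decidable (Pre_plpp_to_ode sys) := by unfold Pre_plpp_to_ode; infer_instance
def pvWitness_plpp_to_ode : (List (Int × List Int × List Int)) := [(2, [1, 0], [0, 1]), (3, [0, 1], [0, 0])]
def Spec_plpp_to_ode (sys : List (Int × List Int × List Int)) (out : List (String × String)) : Prop := out = plpp_to_ode_alt sys
instance (sys : List (Int × List Int × List Int)) (out : List (String × String)) : Decidable (Spec_plpp_to_ode sys out) := by unfold Spec_plpp_to_ode; infer_instance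

-- ===== CLAIM (what is proved, stated in full; the proofs are below) =====
def Claim_equal_plpp_to_ode : Prop := ∀ (sys : List (Int × List Int × List Int)), Dom_plpp_to_ode sys → Pre_plpp_to_ode sys → Spec_plpp_to_ode sys (plpp_to_ode sys)

-- ===== LEMMAS AND PROOFS =====

-- the per-cell update both ports perform, with the monomial in closed form
def pvCell (reac : Int × List Int × List Int) (i : Nat) (s : List Char) : List Char :=
  let mono := PySem.Int.toChars reac.1 ++
    ((((List.range reac.2.1.length).filter (fun (j : Nat) => PySem.List.pyGetD reac.2.1 (j : Int) 0 != 0)).map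
      (fun (j : Nat) => " * z".toList ++ PySem.Int.toChars (j : Int))).flatten)
  if PySem.List.pyGetD reac.2.2 (i : Int) 0 ≠ 0 ∧ PySem.List.pyGetD reac.2.1 (i : Int) 0 = 0 then
    s ++ " + ( ".toList ++ mono ++ " )".toList
  else if PySem.List.pyGetD reac.2.1 (i : Int) 0 ≠ 0 ∧ PySem.List.pyGetD reac.2.2 (i : Int) 0 = 0 then
    s ++ " - ( ".toList ++ mono ++ " )".toList
  else s

theorem pvJoin_nil_eq_flatten (l : List (List Char)) : PySem.Chars.join [] l = l.flatten := by
  induction l with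
  | nil => rfl
  | cons x t ih =>
    cases t <;> simp_all [PySem.Chars.join, List.intercalate, List.intersperse]

theorem pvMonoFold (l : List Nat) (inp : List Int) (a : List Char) :
    l.foldl (fun a (j : Nat) => if PySem.List.pyGetD inp (j : Int) 0 ≠ 0 then a ++ " * z".toList ++ PySem.Int.toChars (j : Int) else a) a
      = a ++ ((l.filter (fun (j : Nat) => PySem.List.pyGetD inp (j : Int) 0 != 0)).map
          (fun (j : Nat) => " * z".toList ++ PySem.Int.toChars (j : Int))).flatten := by
  induction l generalizing a with
  | nil => simp only [List.foldl_nil, List.filter_nil, List.map_nil, List.flatten_nil, List.append_nil]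
  | cons x t ih =>
    rw [List.foldl_cons, List.filter_cons]
    by_cases h : PySem.List.pyGetD inp (x : Int) 0 ≠ 0
    · have hb : (PySem.List.pyGetD inp (x : Int) 0 != 0) = true := by simpa using h
      rw [if_pos h, ih, hb]
      simp only [if_true, List.map_cons, List.flatten_cons, List.append_assoc]
    · have hb : (PySem.List.pyGetD inp (x : Int) 0 != 0) = false := by simpa using h
      rw [if_neg h, ih, hb]
      simp only [Bool.false_eq_true, if_false]

theorem pvStepA_eq_pvCell (reac : Int × List Int × List Int) (i : Nat) (acc : List Char) :
    (let acc' :=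
        if PySem.List.pyGetD reac.2.2 (i : Int) 0 ≠ 0 ∧ PySem.List.pyGetD reac.2.1 (i : Int) 0 = 0 then
          ((List.range reac.2.1.length).foldl
            (fun a (j : Nat) => if PySem.List.pyGetD reac.2.1 (j : Int) 0 ≠ 0 then a ++ " * z".toList ++ PySem.Int.toChars (j : Int) else a)
            (acc ++ " + ( ".toList ++ PySem.Int.toChars reac.1)) ++ " )".toList
        else acc
      if PySem.List.pyGetD reac.2.1 (i : Int) 0 ≠ 0 ∧ PySem.List.pyGetD reac.2.2 (i : Int) 0 = 0 then
        ((List.range reac.2.1.length).foldl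
          (fun a (j : Nat) => if PySem.List.pyGetD reac.2.1 (j : Int) 0 ≠ 0 then a ++ " * z".toList ++ PySem.Int.toChars (j : Int) else a)
          (acc' ++ " - ( ".toList ++ PySem.Int.toChars reac.1)) ++ " )".toList
      else acc')
    = pvCell reac i acc := by
  by_cases h1 : PySem.List.pyGetD reac.2.2 (i : Int) 0 ≠ 0 ∧ PySem.List.pyGetD reac.2.1 (i : Int) 0 = 0
  · by_cases h2 : PySem.List.pyGetD reac.2.1 (i : Int) 0 ≠ 0 ∧ PySem.List.pyGetD reac.2.2 (i : Int) 0 = 0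
    · exact absurd h1.2 h2.1
    · simp only [pvCell, if_pos h1, if_neg h2]
      rw [pvMonoFold]
      simp only [List.append_assoc]
  · by_cases h2 : PySem.List.pyGetD reac.2.1 (i : Int) 0 ≠ 0 ∧ PySem.List.pyGetD reac.2.2 (i : Int) 0 = 0
    · simp only [pvCell, if_neg h1, if_pos h2]
      rw [pvMonoFold]
      simp only [List.append_assoc]
    · simp only [pvCell, if_neg h1, if_neg h2]

theorem pvStepB_eq_pvCell (reac : Int × List Int × List Int) (acc : List (List Char)) :
    (let mono := PySem.Int.toChars reac.1 ++
        PySem.Chars.join []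
          (((List.range reac.2.1.length).filter (fun (j : Nat) => PySem.List.pyGetD reac.2.1 (j : Int) 0 != 0)).map
            (fun (j : Nat) => " * z".toList ++ PySem.Int.toChars (j : Int))) ;
      acc.mapIdx (fun i s =>
        if PySem.List.pyGetD reac.2.2 (i : Int) 0 ≠ 0 ∧ PySem.List.pyGetD reac.2.1 (i : Int) 0 = 0 then
          s ++ " + ( ".toList ++ mono ++ " )".toList
        else if PySem.List.pyGetD reac.2.1 (i : Int) 0 ≠ 0 ∧ PySem.List.pyGetD reac.2.2 (i : Int) 0 = 0 then
          s ++ " - ( ".toList ++ mono ++ " )".toList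
        else s))
    = acc.mapIdx (fun i s => pvCell reac i s) := by
  simp only [pvJoin_nil_eq_flatten]
  rfl

theorem pvFoldB (sys : List (Int × List Int × List Int)) (acc : List (List Char)) :
    sys.foldl (fun acc reac => acc.mapIdx (fun i s => pvCell reac i s)) acc
      = acc.mapIdx (fun i s => sys.foldl (fun t reac => pvCell reac i t) s) := by
  induction sys generalizing acc with
  | nil =>
    rw [List.foldl_nil]
    apply List.ext_getElem <;> simp [List.getElem_mapIdx]
  | cons r t ih =>
    rw [List.foldl_cons, ih]
    apply List.ext_getElem <;> simp [List.getElem_mapIdx]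

theorem plpp_to_ode_eq (sys : List (Int × List Int × List Int)) :
    plpp_to_ode sys = plpp_to_ode_alt sys := by
  cases sys with
  | nil => rfl
  | cons first rest =>
    unfold plpp_to_ode plpp_to_ode_alt
    simp only
    rw [show (fun (acc : List (List Char)) (reac : Int × List Int × List Int) =>
          (let mono := PySem.Int.toChars reac.1 ++
              PySem.Chars.join []
                (((List.range reac.2.1.length).filter (fun (j : Nat) => PySem.List.pyGetD reac.2.1 (j : Int) 0 != 0)).map
                  (fun (j : Nat) => " * z".toList ++ PySem.Int.toChars (j : Int))) ;
            acc.mapIdx (fun i s =>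
              if PySem.List.pyGetD reac.2.2 (i : Int) 0 ≠ 0 ∧ PySem.List.pyGetD reac.2.1 (i : Int) 0 = 0 then
                s ++ " + ( ".toList ++ mono ++ " )".toList
              else if PySem.List.pyGetD reac.2.1 (i : Int) 0 ≠ 0 ∧ PySem.List.pyGetD reac.2.2 (i : Int) 0 = 0 then
                s ++ " - ( ".toList ++ mono ++ " )".toList
              else s)))
        = fun acc reac => acc.mapIdx (fun i s => pvCell reac i s) from
          funext fun acc => funext fun reac => pvStepB_eq_pvCell reac acc]
    rw [pvFoldB]
    apply List.ext_getElem
    · simp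
    · intro i h1 h2
      simp only [List.getElem_map, List.getElem_range, List.getElem_mapIdx, List.getElem_replicate]
      congr 1
      congr 1
      apply PySem.List.foldl_congr_mem
      intro acc reac _
      exact pvStepA_eq_pvCell reac i acc

-- ===== VERDICT (by name: the statement is the Claim_ definition above) =====
theorem plpp_to_ode_spec : Claim_equal_plpp_to_ode := by
  intro sys _ _
  unfold Spec_plpp_to_ode
  exact plpp_to_ode_eq sys
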